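-- pv_equiv track=rewrite | github.com/AjaxMultiCommentary/ajmc-pipeline | ajmc/nlp/token_classification/data_preparation/utils.py | align_from_tokenized
-- ===== SOURCE A (Python) =====
-- from typing import List, Dict, Union, Any, Iterable
--
-- def align_from_tokenized(tokens_to_words_offsets: List[Union[None, int]],
--                          to_align: List[object]) -> List[object]:
--     """Returns the elements of `to_align` if the corresponding element in `tokens_to_words_offsets` is not and is
--     different from the previous one.
--
--     This is used to align a list of tokenized elements to their untokenized equivalent, for instance to align labels
--     to word. It does the contrary to `align_to_tokenized`. Example :
--
--         ```python
--         tokens = ['he', '#llo', 'w', '#o', '#rld']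
--         offsets= [ 0,    0,      1,   1,    1    ]
--         labels = [ 0,    1,      2,   3,    2    ]
--         words =  ['Hello',      'world'          ]
--
--         # aligned labels would be [0, 2]
--         ```
--     """
--     previous_token_index = None
--     aligned_elements = []
--
--     for i, token_index in enumerate(tokens_to_words_offsets):
--         if token_index is None:
--             continue
--         if token_index != previous_token_index:
--             aligned_elements.append(to_align[i])
--
--         previous_token_index = token_index
--
--     return aligned_elements
-- ===== SOURCE B (Python) =====
-- def align_from_tokenized(tokens_to_words_offsets, to_align):
--     # Staged, stateless formulation: filter out None offsets, then mark run
--     # boundaries by zipping the filtered pair list with its own tail (an index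
--     # is kept iff it is the very first pair or its offset differs from the
--     # offset of the pair immediately before it), then gather from to_align.
--     pairs = [(i, t) for i, t in enumerate(tokens_to_words_offsets) if t is not None]
--     keep = [p[0] for p in pairs[:1]]
--     keep += [q[0] for p, q in zip(pairs, pairs[1:]) if p[1] != q[1]]
--     return [to_align[i] for i in keep]
-- ===== Notes on version B (the rewrite author's own statement) =====
-- stated objective: alternative
-- what changed: Replaced A's stateful loop with a 'previous' sentinel by a stateless staged pipeline: filter out None offsets, mark run boundaries by zipping the filtered pair list with its own tail (keep the first pair and every pair whose offset differs from its immediate predecessor), then gather those positions from to_align.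
import Mathlib
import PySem

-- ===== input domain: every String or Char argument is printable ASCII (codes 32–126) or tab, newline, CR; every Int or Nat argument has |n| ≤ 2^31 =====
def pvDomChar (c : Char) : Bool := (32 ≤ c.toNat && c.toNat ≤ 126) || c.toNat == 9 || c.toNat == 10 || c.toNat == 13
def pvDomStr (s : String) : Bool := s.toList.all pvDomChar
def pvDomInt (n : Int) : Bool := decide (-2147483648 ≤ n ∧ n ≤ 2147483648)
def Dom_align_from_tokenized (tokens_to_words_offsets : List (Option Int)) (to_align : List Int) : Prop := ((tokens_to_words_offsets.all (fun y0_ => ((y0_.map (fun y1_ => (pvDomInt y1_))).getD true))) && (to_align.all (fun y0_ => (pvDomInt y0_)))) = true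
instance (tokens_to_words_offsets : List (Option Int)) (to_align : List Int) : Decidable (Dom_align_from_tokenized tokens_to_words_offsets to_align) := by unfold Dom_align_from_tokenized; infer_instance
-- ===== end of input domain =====

-- B replaces A's stateful previous-sentinel loop by a stateless staged pipeline
-- (filter Nones, mark run boundaries by zipping the pair list with its tail, gather);
-- same values and cost, a different decomposition.

-- ===== PORT A =====
-- the body of A's for-loop (state = (previous_token_index, aligned_elements)); 'continue' on None
def pvAStep (to_align : List Int) (st : Option Int × List Int) (p : Int × Option Int) :
    Option Int × List Int :=
  match p.2 with
  | none => st
  | some v =>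
      (some v, if some v ≠ st.1 then st.2 ++ [PySem.List.pyGetD to_align p.1 0] else st.2)
      -- to_align[i]: pyGetD; the default 0 is never reached under Pre_align_from_tokenized

def align_from_tokenized (tokens_to_words_offsets : List (Option Int)) (to_align : List Int) : List Int :=
  ((PySem.List.enumerate tokens_to_words_offsets).foldl (pvAStep to_align) (none, [])).2

-- ===== PORT B =====
-- pairs = [(i, t) for i, t in enumerate(...) if t is not None]
def pvPairs (tokens_to_words_offsets : List (Option Int)) : List (Int × Int) :=
  (PySem.List.enumerate tokens_to_words_offsets).filterMap (fun p => p.2.map (fun v => (p.1, v)))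

def align_from_tokenized_alt (tokens_to_words_offsets : List (Option Int)) (to_align : List Int) : List Int :=
  -- keep = [p[0] for p in pairs[:1]] + [q[0] for p, q in zip(pairs, pairs[1:]) if p[1] != q[1]]
  -- return [to_align[i] for i in keep]
  let pairs := pvPairs tokens_to_words_offsets
  let keep := (pairs.take 1).map (fun p => p.1)
      ++ (((pairs.zip pairs.tail).filter (fun pq => pq.1.2 ≠ pq.2.2)).map (fun pq => pq.2.1))
  keep.map (fun i => PySem.List.pyGetD to_align i 0)

-- ===== PRECONDITION & SPEC =====
-- Exactly the inputs where the Python A returns (B raises at the same places): every position i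
-- holding a non-None offset that starts a new run (its value differs from the last previous
-- non-None offset) must be a valid index into to_align; elsewhere to_align is never indexed.
def Pre_align_from_tokenized (tokens_to_words_offsets : List (Option Int)) (to_align : List Int) : Prop :=
  ∀ i < tokens_to_words_offsets.length,
    (tokens_to_words_offsets.getD i none).isSome →
    (((tokens_to_words_offsets.take i).filterMap id).getLast? = tokens_to_words_offsets.getD i none
      ∨ i < to_align.length)
instance (tokens_to_words_offsets : List (Option Int)) (to_align : List Int) : Decidable (Pre_align_from_tokenized tokens_to_words_offsets to_align) := by unfold Pre_align_from_tokenized; infer_instance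

def pvWitness_align_from_tokenized : List (Option Int) × List Int :=
  ([some 0, none, some 0, some 1, none], [10, 20, 30, 40, 50])

def Spec_align_from_tokenized (tokens_to_words_offsets : List (Option Int)) (to_align : List Int) (out : List Int) : Prop := out = align_from_tokenized_alt tokens_to_words_offsets to_align
instance (tokens_to_words_offsets : List (Option Int)) (to_align : List Int) (out : List Int) : Decidable (Spec_align_from_tokenized tokens_to_words_offsets to_align out) := by unfold Spec_align_from_tokenized; infer_instance

-- ===== CLAIM (what is proved, stated in full; the proofs are below) =====
def Claim_equal_align_from_tokenized : Prop := ∀ (tokens_to_words_offsets : List (Option Int)) (to_align : List Int), Dom_align_from_tokenized tokens_to_words_offsets to_align → Pre_align_from_tokenized tokens_to_words_offsets to_align → Spec_align_from_tokenized tokens_to_words_offsets to_align (align_from_tokenized tokens_to_words_offsets to_align)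

-- ===== LEMMAS AND PROOFS =====

-- the step A performs on a surviving (non-None) pair
def pvGStep (to_align : List Int) (st : Option Int × List Int) (q : Int × Int) :
    Option Int × List Int :=
  (some q.2, if some q.2 ≠ st.1 then st.2 ++ [PySem.List.pyGetD to_align q.1 0] else st.2)

-- run boundaries of a pair list relative to a previous value v
def pvBnd (v : Int) : List (Int × Int) → List Int
  | [] => []
  | q :: rest => (if v ≠ q.2 then [q.1] else []) ++ pvBnd q.2 rest

-- A's fold over the enumerated list equals the fold of pvGStep over the None-filtered pairs
theorem pv_fold_filter (to_align : List Int) :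
    ∀ (L : List (Int × Option Int)) (st : Option Int × List Int),
      L.foldl (pvAStep to_align) st
        = (L.filterMap (fun p => p.2.map (fun v => (p.1, v)))).foldl (pvGStep to_align) st := by
  intro L
  induction L with
  | nil => intro st; rfl
  | cons p rest ih =>
      intro st
      cases hp : p.2 with
      | none => simp [List.foldl_cons, pvAStep, hp, ih]
      | some v => simp [List.foldl_cons, pvAStep, pvGStep, hp, ih]

theorem pv_fold_some (to_align : List Int) :
    ∀ (l : List (Int × Int)) (v : Int) (acc : List Int),
      (l.foldl (pvGStep to_align) (some v, acc)).2
        = acc ++ (pvBnd v l).map (fun i => PySem.List.pyGetD to_align i 0) := by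
  intro l
  induction l with
  | nil => intro v acc; simp [pvBnd]
  | cons q rest ih =>
      intro v acc
      by_cases hv : q.2 = v
      · have hstep : pvGStep to_align (some v, acc) q = (some v, acc) := by
          simp [pvGStep, hv]
        simp only [List.foldl_cons, hstep, pvBnd, hv]
        simpa [hv] using ih v acc
      · have hstep : pvGStep to_align (some v, acc) q
            = (some q.2, acc ++ [PySem.List.pyGetD to_align q.1 0]) := by
          simp [pvGStep, hv]
        simp only [List.foldl_cons, hstep, pvBnd]
        rw [ih q.2 (acc ++ [PySem.List.pyGetD to_align q.1 0])]
        rw [if_pos (fun h => hv h.symm)]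
        simp

-- zip-with-tail boundary marking computes pvBnd
theorem pv_zip_bnd :
    ∀ (rest : List (Int × Int)) (p : Int × Int),
      (((p :: rest).zip rest).filter (fun pq => pq.1.2 ≠ pq.2.2)).map (fun pq => pq.2.1)
        = pvBnd p.2 rest := by
  intro rest
  induction rest with
  | nil => intro p; simp [pvBnd]
  | cons q rest ih =>
      intro p
      have hz : (p :: q :: rest).zip (q :: rest) = (p, q) :: (q :: rest).zip rest := rfl
      rw [hz]
      by_cases h : p.2 = q.2
      · simpa [pvBnd, h] using ih q
      · simpa [pvBnd, h] using ih q

-- ===== VERDICT (by name: the statement is the Claim_ definition above) =====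
theorem align_from_tokenized_spec : Claim_equal_align_from_tokenized := by
  intro offs ta _ _
  unfold Spec_align_from_tokenized align_from_tokenized align_from_tokenized_alt
  rw [pv_fold_filter ta]
  show _ = (((pvPairs offs).take 1).map (fun p => p.1)
      ++ ((((pvPairs offs).zip (pvPairs offs).tail).filter (fun pq => pq.1.2 ≠ pq.2.2)).map
          (fun pq => pq.2.1))).map (fun i => PySem.List.pyGetD ta i 0)
  cases hp : pvPairs offs with
  | nil =>
      have hP : (PySem.List.enumerate offs).filterMap (fun p => p.2.map (fun v => (p.1, v)))
          = ([] : List (Int × Int)) := hp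
      rw [hP]
      rfl
  | cons p rest =>
      have hP : (PySem.List.enumerate offs).filterMap (fun p => p.2.map (fun v => (p.1, v)))
          = p :: rest := hp
      rw [hP]
      simp only [List.foldl_cons, List.tail_cons, List.take, List.map_cons, List.map_nil]
      have hstep : pvGStep ta (none, []) p = (some p.2, [PySem.List.pyGetD ta p.1 0]) := by
        simp [pvGStep]
      rw [hstep, pv_fold_some ta rest p.2, pv_zip_bnd rest p]
      simp
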